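-- pv_equiv track=rewrite | github.com/BBBuyan/bench | src/mongo_bench/mongo_types/ArrMongo.py | _get_unwind
-- ===== SOURCE A (Python) =====
-- def _get_unwind(level: int):
--     unwind = []
--     path = ""
--     for i in range(level):
--         if i != 0:
--             path += "."
--         path += f"a{i+1}"
--         unwind.append({"$unwind": f"${path}"})
--
--     return unwind
-- ===== SOURCE B (Python) =====
-- def _get_unwind(level: int):
--     names = [f"a{j+1}" for j in range(level)]
--     return [{"$unwind": "$" + ".".join(names[:i+1])} for i in range(level)]
-- ===== Notes on version B (the rewrite author's own statement) =====
-- stated objective: simpler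
-- what changed: Replaces the loop that threads a mutable running-path string (with an i!=0 separator branch) by precomputing the field-name list once and emitting each unwind stage independently as a '.'-join of a prefix slice of that list.
import Mathlib
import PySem

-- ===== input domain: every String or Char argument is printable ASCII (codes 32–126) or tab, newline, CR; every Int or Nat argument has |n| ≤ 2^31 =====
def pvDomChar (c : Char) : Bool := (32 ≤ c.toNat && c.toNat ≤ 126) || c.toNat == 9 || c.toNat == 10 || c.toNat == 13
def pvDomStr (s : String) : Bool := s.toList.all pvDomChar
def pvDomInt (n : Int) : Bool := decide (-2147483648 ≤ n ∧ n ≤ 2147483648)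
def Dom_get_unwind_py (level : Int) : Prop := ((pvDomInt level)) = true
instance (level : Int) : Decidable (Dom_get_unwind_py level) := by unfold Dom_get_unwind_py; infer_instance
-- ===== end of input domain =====

-- B replaces A's running-path accumulator loop by a comprehension recomputing each
-- unwind path independently as a '.'-join of its prefix of field names (objective: simpler).


-- ===== PORT A =====
def get_unwind_py (level : Int) : List (List (String × String)) :=
  ((PySem.List.pyRange 0 level 1).foldl
    (fun (st : List (List (String × String)) × String) i =>
      let path := if i ≠ 0 then st.2 ++ "." else st.2
      let path := path ++ ("a" ++ PySem.Int.toStr (i + 1))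
      (st.1 ++ [[("$unwind", "$" ++ path)]], path))
    ([], "")).1

-- ===== PORT B =====
def get_unwind_py_alt (level : Int) : List (List (String × String)) :=
  let names := (PySem.List.pyRange 0 level 1).map (fun j => "a" ++ PySem.Int.toStr (j + 1))
  (PySem.List.pyRange 0 level 1).map (fun i =>
    [("$unwind", "$" ++ PySem.Str.join "." (PySem.List.slice names none (some (i + 1))))])

-- ===== PRECONDITION & SPEC =====
def Spec_get_unwind_py (level : Int) (out : List (List (String × String))) : Prop := out = get_unwind_py_alt level
instance (level : Int) (out : List (List (String × String))) : Decidable (Spec_get_unwind_py level out) := by unfold Spec_get_unwind_py; infer_instance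

-- ===== CLAIM (what is proved, stated in full; the proofs are below) =====
def Claim_equal_get_unwind_py : Prop := ∀ (level : Int), Dom_get_unwind_py level → Spec_get_unwind_py level (get_unwind_py level)

-- ===== LEMMAS AND PROOFS =====

-- the path after processing range(n): the '.'-join of the first n field names
theorem pvJoinChars (sep : List Char) (xs : List (List Char)) (x : List Char) :
    PySem.Chars.join sep (xs ++ [x]) =
      if xs = [] then x else PySem.Chars.join sep xs ++ sep ++ x := by
  induction xs with
  | nil => simp [PySem.Chars.join_singleton]
  | cons a as ih =>
    cases as with
    | nil => simp [PySem.Chars.join_cons_cons, PySem.Chars.join_singleton]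
    | cons b bs =>
      simp only [List.cons_append, PySem.Chars.join_cons_cons] at *
      simp [ih, List.append_assoc]

theorem pvJoin_append_singleton (sep : String) (xs : List String) (x : String) :
    PySem.Str.join sep (xs ++ [x]) =
      if xs = [] then x else PySem.Str.join sep xs ++ (sep ++ x) := by
  unfold PySem.Str.join
  rw [List.map_append, List.map_singleton, pvJoinChars]
  simp only [List.map_eq_nil_iff]
  split_ifs with h
  · simp
  · simp [String.ofList_append]

def pvPathUpTo (n : Int) : String :=
  PySem.Str.join "." ((PySem.List.pyRange 0 n 1).map (fun j => "a" ++ PySem.Int.toStr (j + 1)))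

theorem pvPathUpTo_succ (n : Nat) :
    pvPathUpTo ((n : Int) + 1) =
      (if (n : Int) ≠ 0 then pvPathUpTo n ++ "." else pvPathUpTo n) ++
        ("a" ++ PySem.Int.toStr ((n : Int) + 1)) := by
  unfold pvPathUpTo
  rw [PySem.List.pyRange_one_succ_right (by omega), List.map_append, List.map_singleton,
    pvJoin_append_singleton]
  split_ifs with h1 h2 h3
  · exfalso
    apply h2
    rw [List.map_eq_nil_iff] at h1
    have := PySem.List.length_pyRange_one 0 (n : Int)
    rw [h1] at this
    simp at this
    omega
  · rw [h1]
    simp [PySem.Str.join, PySem.Chars.join_nil]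
  · rw [String.append_assoc]
  · exfalso
    apply h1
    have hz : (n : Int) = 0 := by omega
    rw [hz, PySem.List.pyRange_one_eq_nil (by omega)]
    rfl

theorem pvLoopA (n : Nat) :
    (PySem.List.pyRange 0 (n : Int) 1).foldl
      (fun (st : List (List (String × String)) × String) i =>
        let path := if i ≠ 0 then st.2 ++ "." else st.2
        let path := path ++ ("a" ++ PySem.Int.toStr (i + 1))
        (st.1 ++ [[("$unwind", "$" ++ path)]], path))
      ([], "")
    = ((PySem.List.pyRange 0 (n : Int) 1).map
         (fun i => [("$unwind", "$" ++ pvPathUpTo (i + 1))]),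
       pvPathUpTo n) := by
  induction n with
  | zero =>
    simp [PySem.List.pyRange_one_eq_nil (le_refl 0), pvPathUpTo, PySem.Str.join,
      PySem.Chars.join_nil]
  | succ m ih =>
    rw [show ((m + 1 : Nat) : Int) = (m : Int) + 1 by omega]
    rw [PySem.List.pyRange_one_succ_right (by omega), List.foldl_append, ih,
      List.map_append]
    simp only [List.foldl_cons, List.foldl_nil, List.map_singleton]
    rw [← pvPathUpTo_succ m]

theorem pvAltEq (level : Int) :
    get_unwind_py_alt level =
      (PySem.List.pyRange 0 level 1).map
        (fun i => [("$unwind", "$" ++ pvPathUpTo (i + 1))]) := by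
  unfold get_unwind_py_alt
  apply List.map_congr_left
  intro i hi
  rw [PySem.List.mem_pyRange_one] at hi
  have hk : i = ((i.toNat : Nat) : Int) := by omega
  have h1 : i + 1 = ((i.toNat + 1 : Nat) : Int) := by omega
  rw [h1, PySem.List.slice_to_natCast, ← List.map_take, pvPathUpTo]
  have h2 : (PySem.List.pyRange 0 level 1).take (i.toNat + 1) =
      PySem.List.pyRange 0 (i + 1) 1 := by
    rw [PySem.List.pyRange_one, PySem.List.pyRange_one, ← List.map_take, List.take_range]
    have h3 : min (i.toNat + 1) ((level - 0).toNat) = ((i + 1) - 0).toNat := by omega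
    rw [h3]
  rw [h2, ← h1]

-- ===== VERDICT (by name: the statement is the Claim_ definition above) =====
theorem get_unwind_py_spec : Claim_equal_get_unwind_py := by
  intro level _
  unfold Spec_get_unwind_py
  rw [pvAltEq]
  unfold get_unwind_py
  by_cases h : level ≤ 0
  · rw [PySem.List.pyRange_one_eq_nil (by omega)]
    rfl
  · have hn : level = ((level.toNat : Nat) : Int) := by omega
    rw [hn, pvLoopA]
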